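-- pv_equiv track=rewrite | github.com/AP-MI-2021/lab-3-RaulParaschivBucur | main.py | concat_is_ascending
-- ===== SOURCE A (Python) =====
-- def concat_is_ascending(lst):
--     """
--     Verifica daca o lista are concatenarea elementelor cu cifrele in ordine crescatoare
--     """
--     concat = ''
--     for idx in lst:
--         concat += str(idx)
--
--     for idx in range(0, len(concat) - 1):
--         if concat[idx] > concat[idx + 1]:
--             return False
--     return True
-- ===== SOURCE B (Python) =====
-- def concat_is_ascending(lst):
--     concat = ''.join(str(x) for x in lst)
--     return list(concat) == sorted(concat)
-- ===== Notes on version B (the rewrite author's own statement) =====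
-- stated objective: idiomatic
-- what changed: Replaces the index-based early-exit scan of adjacent characters with building the concatenation via join and comparing the character list against its sorted version.
import Mathlib
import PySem

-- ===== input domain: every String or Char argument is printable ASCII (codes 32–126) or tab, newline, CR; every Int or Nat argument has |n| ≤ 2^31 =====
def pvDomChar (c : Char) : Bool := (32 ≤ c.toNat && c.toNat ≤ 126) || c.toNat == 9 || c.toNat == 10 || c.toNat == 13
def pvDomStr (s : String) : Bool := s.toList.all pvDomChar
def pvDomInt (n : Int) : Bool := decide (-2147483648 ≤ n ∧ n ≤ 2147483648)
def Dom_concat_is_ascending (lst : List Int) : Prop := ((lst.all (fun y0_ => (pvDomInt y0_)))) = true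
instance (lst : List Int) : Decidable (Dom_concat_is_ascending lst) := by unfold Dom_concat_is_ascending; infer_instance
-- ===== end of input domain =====

-- B replaces A's index-based early-exit adjacent-pair scan by comparing the
-- concatenation's character list with its sorted version (idiomatic; return value only).

-- ===== PORT A =====
-- the 'for idx in range(0, len(concat)-1): if concat[idx] > concat[idx+1]: return False' loop
def pvALoop (cs : List Char) : List Int → Bool
  | [] => true
  | i :: rest =>
      if PySem.List.pyGetD cs i 'a' > PySem.List.pyGetD cs (i + 1) 'a' then false
      else pvALoop cs rest

def concat_is_ascending (lst : List Int) : Bool :=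
  let concat := lst.foldl (fun acc n => acc ++ PySem.Int.toChars n) []
  pvALoop concat (PySem.List.pyRange 0 ((concat.length : Int) - 1) 1)

-- ===== PORT B =====
def concat_is_ascending_alt (lst : List Int) : Bool :=
  let concat := (lst.map PySem.Int.toChars).flatten
  concat == PySem.List.sorted concat (fun c => c) false

-- ===== PRECONDITION & SPEC =====
def Spec_concat_is_ascending (lst : List Int) (out : Bool) : Prop := out = concat_is_ascending_alt lst
instance (lst : List Int) (out : Bool) : Decidable (Spec_concat_is_ascending lst out) := by unfold Spec_concat_is_ascending; infer_instance

-- ===== CLAIM (what is proved, stated in full; the proofs are below) =====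
def Claim_equal_concat_is_ascending : Prop := ∀ (lst : List Int), Dom_concat_is_ascending lst → Spec_concat_is_ascending lst (concat_is_ascending lst)

-- ===== LEMMAS AND PROOFS =====

theorem pv_concat_eq (lst : List Int) :
    lst.foldl (fun acc n => acc ++ PySem.Int.toChars n) [] = (lst.map PySem.Int.toChars).flatten := by
  suffices h : ∀ (l : List Int) (acc : List Char),
      l.foldl (fun acc n => acc ++ PySem.Int.toChars n) acc = acc ++ (l.map PySem.Int.toChars).flatten by
    simpa using h lst []
  intro l
  induction l with
  | nil => simp
  | cons x xs ih => intro acc; simp [ih]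

theorem pv_aLoop_iff (cs : List Char) (a b : Int) :
    (pvALoop cs (PySem.List.pyRange a b 1) = true) ↔
      ∀ i : Int, a ≤ i → i < b →
        PySem.List.pyGetD cs i 'a' ≤ PySem.List.pyGetD cs (i + 1) 'a' := by
  by_cases hab : b ≤ a
  · rw [PySem.List.pyRange_one_eq_nil hab]
    simp only [pvALoop]
    constructor
    · intro _ i h1 h2; omega
    · intro _; trivial
  · push Not at hab
    rw [PySem.List.pyRange_one_cons hab]
    simp only [pvALoop]
    have ih := pv_aLoop_iff cs (a + 1) b
    by_cases hc : PySem.List.pyGetD cs a 'a' > PySem.List.pyGetD cs (a + 1) 'a'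
    · simp only [if_pos hc]
      constructor
      · intro h; exact absurd h (by simp)
      · intro h
        exact absurd (h a le_rfl hab) (not_le.mpr hc)
    · simp only [if_neg hc, ih]
      constructor
      · intro h i h1 h2
        rcases eq_or_lt_of_le h1 with rfl | h1'
        · exact not_lt.mp hc
        · exact h i (by omega) h2
      · intro h i h1 h2
        exact h i (by omega) h2
termination_by (b - a).toNat
decreasing_by omega

theorem pv_pairwise_iff (cs : List Char) :
    cs.Pairwise (· ≤ ·) ↔
      ∀ i : Int, 0 ≤ i → i < (cs.length : Int) - 1 →
        PySem.List.pyGetD cs i 'a' ≤ PySem.List.pyGetD cs (i + 1) 'a' := by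
  rw [← List.isChain_iff_pairwise, List.isChain_iff_getElem]
  constructor
  · intro h i h0 h1
    have hi : i.toNat + 1 < cs.length := by omega
    rw [PySem.List.pyGetD_eq_getElem cs 'a' h0 (by omega),
        PySem.List.pyGetD_eq_getElem cs 'a' (by omega) (by omega)]
    have heq : (i + 1).toNat = i.toNat + 1 := by omega
    simpa [heq] using h i.toNat hi
  · intro h i hi
    have := h (i : Int) (by omega) (by omega)
    rw [PySem.List.pyGetD_eq_getElem cs 'a' (by omega) (by omega),
        PySem.List.pyGetD_eq_getElem cs 'a' (by omega) (by omega)] at this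
    have h1 : ((i : Int)).toNat = i := by omega
    have h2 : ((i : Int) + 1).toNat = i + 1 := by omega
    simpa [h1, h2] using this

theorem pv_sorted_iff (cs : List Char) :
    (cs == PySem.List.sorted cs (fun c => c) false) = true ↔ cs.Pairwise (· ≤ ·) := by
  rw [beq_iff_eq]
  constructor
  · intro h
    have := PySem.List.sorted_pairwise cs (fun c => c)
    rw [← h] at this
    simpa using this
  · intro h
    exact (PySem.List.sorted_eq_self_of_pairwise cs (fun c => c) (by simpa using h)).symm

-- ===== VERDICT (by name: the statement is the Claim_ definition above) =====
theorem concat_is_ascending_spec : Claim_equal_concat_is_ascending := by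
  intro lst _
  unfold Spec_concat_is_ascending concat_is_ascending concat_is_ascending_alt
  simp only [pv_concat_eq]
  set cs := (lst.map PySem.Int.toChars).flatten with hcs
  rw [Bool.eq_iff_iff, pv_aLoop_iff, pv_sorted_iff, pv_pairwise_iff]
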